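-- pv_equiv track=rewrite | github.com/Misha-blue/TA | Диплом/Plasmid/Приведение к формату тагма.py | chose
-- ===== SOURCE A (Python) =====
-- def chose(a):
--     s = []
--     p = ''
--     m = 0
--     for i in range(len(a)):
--         s.append(a[i])
--     for i in range(len(s)):
--         if s[i] == '~':
--             m +=1
--         if m == 2:
--             s[i] = '|'
--             m -=1
--     for i in range(len(s)):
--         p += s[i]
--     return(p)
-- ===== SOURCE B (Python) =====
-- def chose(a):
--     i = a.find('~')
--     if i == -1:
--         return a
--     return a[:i+1] + a[i+1:].replace('~', '|')
-- ===== Notes on version B (the rewrite author's own statement) =====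
-- stated objective: faster
-- what changed: Replaced the three explicit index loops and the running counter with a single find of the first tilde plus a bulk str.replace on the suffix after it.
import Mathlib
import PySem

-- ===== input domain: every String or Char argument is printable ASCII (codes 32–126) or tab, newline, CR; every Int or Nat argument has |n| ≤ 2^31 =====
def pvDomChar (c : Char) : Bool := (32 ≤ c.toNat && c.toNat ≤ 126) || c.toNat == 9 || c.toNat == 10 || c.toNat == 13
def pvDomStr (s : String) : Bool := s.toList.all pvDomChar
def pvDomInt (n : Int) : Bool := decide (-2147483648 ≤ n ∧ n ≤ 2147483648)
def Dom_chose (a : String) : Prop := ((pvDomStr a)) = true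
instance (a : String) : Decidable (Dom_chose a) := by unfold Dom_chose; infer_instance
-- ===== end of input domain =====

-- B replaces A's three index loops and running counter by one find of the first '~'
-- plus a bulk replace of '~' by '|' on the suffix after it (idiomatic).

-- ===== PORT A =====
-- literal port: list s built index by index, the counter loop with in-place s[i] = '|',
-- then p rebuilt character by character (p kept as List Char, returned via String.ofList)
def chose (a : String) : String :=
  let cs := a.toList
  let s : List Char :=
    (PySem.List.pyRange 0 (PySem.Str.len a) 1).foldl
      (fun s i => s ++ [PySem.List.pyGetD cs i ' ']) []
  let sm : List Char × Int :=
    (PySem.List.pyRange 0 (s.length : Int) 1).foldl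
      (fun sm i =>
        let m := if PySem.List.pyGetD sm.1 i ' ' == '~' then sm.2 + 1 else sm.2
        if m == 2 then (PySem.List.pySetD sm.1 i '|', m - 1) else (sm.1, m))
      (s, 0)
  let p : List Char :=
    (PySem.List.pyRange 0 (sm.1.length : Int) 1).foldl
      (fun p i => p ++ [PySem.List.pyGetD sm.1 i ' ']) []
  String.ofList p

-- ===== PORT B =====
def chose_alt (a : String) : String :=
  let i := PySem.Str.find a "~"
  if i == -1 then a
  else PySem.Str.slice a none (some (i + 1)) ++
       PySem.Str.replace (PySem.Str.slice a (some (i + 1)) none) "~" "|"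

-- ===== PRECONDITION & SPEC =====
def Spec_chose (a : String) (out : String) : Prop := out = chose_alt a
instance (a : String) (out : String) : Decidable (Spec_chose a out) := by unfold Spec_chose; infer_instance

-- ===== CLAIM (what is proved, stated in full; the proofs are below) =====
def Claim_equal_chose : Prop := ∀ (a : String), Dom_chose a → Spec_chose a (chose a)

-- ===== LEMMAS AND PROOFS =====

-- structural form of A's middle loop: state (output so far, counter)
def pvGo : List Char → Int → List Char × Int
  | [], m => ([], m)
  | c :: cs, m =>
      let m1 := if c == '~' then m + 1 else m
      if m1 == 2 then ('|' :: (pvGo cs (m1 - 1)).1, (pvGo cs (m1 - 1)).2)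
      else (c :: (pvGo cs m1).1, (pvGo cs m1).2)

-- the character map B's suffix replace performs
def pvRep (c : Char) : Char := if c == '~' then '|' else c

lemma pvGo_one (cs : List Char) : pvGo cs 1 = (cs.map pvRep, 1) := by
  induction cs with
  | nil => rfl
  | cons c cs ih =>
    by_cases h : c = '~' <;> simp [pvGo, pvRep, h, ih]

lemma pvGo_no_tilde (cs : List Char) (h : '~' ∉ cs) : pvGo cs 0 = (cs, 0) := by
  induction cs with
  | nil => rfl
  | cons c cs ih =>
    simp only [List.mem_cons, not_or] at h
    simp [pvGo, Ne.symm h.1, ih h.2]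

lemma pvGo_split (pre rest : List Char) (h : '~' ∉ pre) :
    (pvGo (pre ++ '~' :: rest) 0).1 = pre ++ '~' :: rest.map pvRep := by
  induction pre with
  | nil => simp [pvGo, pvGo_one]
  | cons c pre ih =>
    simp only [List.mem_cons, not_or] at h
    simp [pvGo, Ne.symm h.1, ih h.2]

-- A's index loop with pyGetD/pySetD equals pvGo on the unprocessed suffix
lemma pvLoopA (rest done : List Char) (m : Int) :
    (PySem.List.pyRange (done.length : Int) ((done.length + rest.length : Nat) : Int) 1).foldl
      (fun (sm : List Char × Int) i =>
        let m := if PySem.List.pyGetD sm.1 i ' ' == '~' then sm.2 + 1 else sm.2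
        if m == 2 then (PySem.List.pySetD sm.1 i '|', m - 1) else (sm.1, m))
      (done ++ rest, m)
    = (done ++ (pvGo rest m).1, (pvGo rest m).2) := by
  induction rest generalizing done m with
  | nil => simp [PySem.List.pyRange_one_eq_nil, pvGo]
  | cons c cs ih =>
    have hb : (done.length : Int) < ((done.length + (c :: cs).length : Nat) : Int) := by
      push_cast; simp
    rw [PySem.List.pyRange_one_cons hb, List.foldl_cons]
    have hget : PySem.List.pyGetD (done ++ c :: cs) (done.length : Int) ' ' = c := by
      simp [PySem.List.pyGetD_natCast, List.getD]
    have hset : PySem.List.pySetD (done ++ c :: cs) (done.length : Int) '|' = done ++ '|' :: cs := by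
      simp [PySem.List.pySetD_natCast]
    simp only [hget, hset]
    by_cases hc : c = '~'
    · subst hc
      simp only [beq_self_eq_true, if_true]
      by_cases hm : m + 1 = 2
      · rw [if_pos (by simpa using hm)]
        have e1 : done ++ '|' :: cs = (done ++ ['|']) ++ cs := by simp
        have e2 : ((done.length : Int) + 1) = (((done ++ ['|']).length : Nat) : Int) := by
          simp
        have e3 : ((done.length + ('~' :: cs).length : Nat) : Int)
            = (((done ++ ['|']).length + cs.length : Nat) : Int) := by simp; ring
        rw [e1, e2, e3, ih]
        simp [pvGo, hm]
      · rw [if_neg (by simpa using hm)]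
        have e1 : done ++ '~' :: cs = (done ++ ['~']) ++ cs := by simp
        have e2 : ((done.length : Int) + 1) = (((done ++ ['~']).length : Nat) : Int) := by
          simp
        have e3 : ((done.length + ('~' :: cs).length : Nat) : Int)
            = (((done ++ ['~']).length + cs.length : Nat) : Int) := by simp; ring
        rw [e1, e2, e3, ih]
        simp [pvGo, hm]
    · have hcb : (c == '~') = false := by simp [hc]
      rw [hcb]
      simp only [Bool.false_eq_true, if_false]
      by_cases hm : m = 2
      · rw [if_pos (by simpa using hm)]
        have e1 : done ++ '|' :: cs = (done ++ ['|']) ++ cs := by simp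
        have e2 : ((done.length : Int) + 1) = (((done ++ ['|']).length : Nat) : Int) := by
          simp
        have e3 : ((done.length + (c :: cs).length : Nat) : Int)
            = (((done ++ ['|']).length + cs.length : Nat) : Int) := by simp; ring
        rw [e1, e2, e3, ih]
        simp [pvGo, hc, hm]
      · rw [if_neg (by simpa using hm)]
        have e1 : done ++ c :: cs = (done ++ [c]) ++ cs := by simp
        have e2 : ((done.length : Int) + 1) = (((done ++ [c]).length : Nat) : Int) := by
          simp
        have e3 : ((done.length + (c :: cs).length : Nat) : Int)
            = (((done ++ [c]).length + cs.length : Nat) : Int) := by simp; ring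
        rw [e1, e2, e3, ih]
        simp [pvGo, hc, hm]

-- replace with a one-character pattern is a character map
lemma pvReplaceGo_map (fuel : Nat) (l acc : List Char) (h : l.length ≤ fuel) :
    PySem.Chars.replace.go ['~'] ['|'] fuel l acc = acc.reverse ++ l.map pvRep := by
  induction fuel generalizing l acc with
  | zero =>
    have hl : l = [] := List.eq_nil_of_length_eq_zero (by omega)
    subst hl
    simp [PySem.Chars.replace.go]
  | succ fuel ih =>
    cases l with
    | nil => simp [PySem.Chars.replace.go]
    | cons c t =>
      by_cases hc : c = '~'
      · subst hc
        rw [show PySem.Chars.replace.go ['~'] ['|'] (fuel + 1) ('~' :: t) acc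
              = PySem.Chars.replace.go ['~'] ['|'] fuel t ('|' :: acc) from by
            simp [PySem.Chars.replace.go, List.isPrefixOf]]
        rw [ih t ('|' :: acc) (by simpa using Nat.lt_succ_iff.mp (by simpa using h))]
        simp [pvRep]
      · rw [show PySem.Chars.replace.go ['~'] ['|'] (fuel + 1) (c :: t) acc
              = PySem.Chars.replace.go ['~'] ['|'] fuel t (c :: acc) from by
            simp [PySem.Chars.replace.go, List.isPrefixOf, Ne.symm hc]]
        rw [ih t (c :: acc) (by simpa using Nat.lt_succ_iff.mp (by simpa using h))]
        simp [pvRep, hc]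

-- replace with a one-character pattern is a character map
lemma pvReplace_map (cs : List Char) :
    PySem.Chars.replace cs ['~'] ['|'] = cs.map pvRep := by
  rw [show PySem.Chars.replace cs ['~'] ['|']
        = PySem.Chars.replace.go ['~'] ['|'] cs.length cs [] from by
      simp [PySem.Chars.replace]]
  simp [pvReplaceGo_map cs.length cs [] le_rfl]

-- pvGo's result in terms of find / take / map / drop
lemma pvGo_eq_find (cs : List Char) :
    (pvGo cs 0).1 =
      if PySem.Chars.find cs ['~'] == -1 then cs
      else cs.take ((PySem.Chars.find cs ['~']).toNat + 1) ++
           (cs.drop ((PySem.Chars.find cs ['~']).toNat + 1)).map pvRep := by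
  by_cases h : PySem.Chars.find cs ['~'] = -1
  · rw [if_pos (by simpa using h)]
    have hmem : '~' ∉ cs := by
      have := (PySem.Chars.find_eq_neg_one_iff cs ['~']).mp h
      simpa [List.singleton_infix_iff] using this
    simp [pvGo_no_tilde cs hmem]
  · rw [if_neg (by simpa using h)]
    have h0 : 0 ≤ PySem.Chars.find cs ['~'] := by
      have := PySem.Chars.neg_one_le_find cs ['~']; omega
    obtain ⟨hpre, hmin⟩ := PySem.Chars.find_spec h0
    set n := (PySem.Chars.find cs ['~']).toNat with hn
    obtain ⟨t, ht⟩ := hpre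
    have hn_lt : n < cs.length := by
      by_contra hge
      rw [List.drop_eq_nil_of_le (by omega)] at ht
      simp at ht
    have hdrop : cs.drop n = '~' :: cs.drop (n + 1) := by
      have htail : cs.drop (n + 1) = (cs.drop n).tail := by
        rw [← List.drop_drop]; simp
      rw [htail, ← ht]; simp
    have hlen : (cs.take n).length = n := by simp [Nat.le_of_lt hn_lt]
    have hnot : '~' ∉ cs.take n := by
      intro hmem
      obtain ⟨j, hj, hjv⟩ := List.getElem_of_mem hmem
      have hjn : j < n := by simpa [hlen] using hj
      refine hmin j hjn ⟨cs.drop (j + 1), ?_⟩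
      have : cs.drop j = cs[j] :: cs.drop (j + 1) := List.drop_eq_getElem_cons (by omega)
      rw [this]
      simp only [List.getElem_take] at hjv
      simp [hjv]
    have hsplit : cs = cs.take n ++ '~' :: cs.drop (n + 1) := by
      conv_lhs => rw [← List.take_append_drop n cs, hdrop]
    have htake : cs.take (n + 1) = cs.take n ++ ['~'] := by
      conv_lhs => rw [hsplit]
      rw [← hlen]
      simp [List.take_append]
    rw [htake]
    conv_lhs => rw [hsplit]
    rw [pvGo_split _ _ hnot]
    simp

-- ===== VERDICT (by name: the statement is the Claim_ definition above) =====
-- the copy loops (first and third loop of A) are identity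
lemma pvCopy (l : List Char) :
    (PySem.List.pyRange 0 (l.length : Int) 1).foldl
      (fun p i => p ++ [PySem.List.pyGetD l i ' ']) [] = l := by
  rw [PySem.List.foldl_pyRange_zero_pyGetD' l ' ' (fun acc c => acc ++ [c]) []]
  exact PySem.List.foldl_append_singleton l []

-- ===== VERDICT (by name: the statement is the Claim_ definition above) =====
theorem chose_spec : Claim_equal_chose := by
  intro a _
  show chose a = chose_alt a
  have hlen : PySem.Str.len a = (a.toList.length : Int) := by simp
  have hmid : (PySem.List.pyRange 0 ((a.toList.length : Nat) : Int) 1).foldl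
      (fun (sm : List Char × Int) i =>
        let m := if PySem.List.pyGetD sm.1 i ' ' == '~' then sm.2 + 1 else sm.2
        if m == 2 then (PySem.List.pySetD sm.1 i '|', m - 1) else (sm.1, m))
      (a.toList, 0) = pvGo a.toList 0 := by
    have h := pvLoopA a.toList [] 0
    simp only [List.nil_append, List.length_nil, Nat.cast_zero, Nat.zero_add] at h
    rw [h]
  have hA : chose a = String.ofList (pvGo a.toList 0).1 := by
    unfold chose
    simp only [hlen]
    rw [pvCopy a.toList, hmid, pvCopy ((pvGo a.toList 0).1)]
  rw [hA, pvGo_eq_find]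
  unfold chose_alt
  have hfind : PySem.Str.find a "~" = PySem.Chars.find a.toList ['~'] := by
    simp [PySem.Str.find_eq]
  rw [hfind]
  by_cases h : PySem.Chars.find a.toList ['~'] = -1
  · simp [h]
  · rw [if_neg (by simpa using h), if_neg (by simpa using h)]
    have h0 : 0 ≤ PySem.Chars.find a.toList ['~'] := by
      have := PySem.Chars.neg_one_le_find a.toList ['~']; omega
    set i := PySem.Chars.find a.toList ['~'] with hi
    have htn : (i + 1).toNat = i.toNat + 1 := by omega
    apply String.toList_inj.mp
    rw [String.toList_ofList, String.toList_append]
    simp only [PySem.Str.toList_replace, PySem.Str.toList_slice, PySem.Chars.slice_eq_listSlice]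
    rw [PySem.List.slice_to a.toList (b := i + 1) (by omega),
        PySem.List.slice_from a.toList (a := i + 1) (by omega), htn]
    rw [show ("~" : String).toList = ['~'] from rfl, show ("|" : String).toList = ['|'] from rfl]
    rw [pvReplace_map]
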